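-- pv_equiv track=rewrite | github.com/Patihehe/BTL_AI | src/board_utils.py | create_goal_state
-- ===== SOURCE A (Python) =====
-- from typing import List, Tuple
--
-- def create_goal_state(N: int) -> List[List[int]]:
--     """Tạo trạng thái mục tiêu cho bảng NxN."""
--     goal = [[0] * N for _ in range(N)]
--     for i in range(N):
--         for j in range(N):
--             if i == N-1 and j == N-1:
--                 goal[i][j] = 0
--             else:
--                 goal[i][j] = i * N + j + 1
--     return goal
-- ===== SOURCE B (Python) =====
-- def create_goal_state(N):
--     """Tạo trạng thái mục tiêu cho bảng NxN."""
--     if N <= 0: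
--         return []
--     vals = list(range(1, N * N)) + [0]
--     return [vals[i * N:(i + 1) * N] for i in range(N)]
-- ===== Notes on version B (the rewrite author's own statement) =====
-- stated objective: simpler
-- what changed: Builds the flat sequence 1..N^2-1 followed by 0 once and reshapes it into rows by slicing, instead of a nested per-cell loop with an i==N-1 and j==N-1 conditional.
import Mathlib
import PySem

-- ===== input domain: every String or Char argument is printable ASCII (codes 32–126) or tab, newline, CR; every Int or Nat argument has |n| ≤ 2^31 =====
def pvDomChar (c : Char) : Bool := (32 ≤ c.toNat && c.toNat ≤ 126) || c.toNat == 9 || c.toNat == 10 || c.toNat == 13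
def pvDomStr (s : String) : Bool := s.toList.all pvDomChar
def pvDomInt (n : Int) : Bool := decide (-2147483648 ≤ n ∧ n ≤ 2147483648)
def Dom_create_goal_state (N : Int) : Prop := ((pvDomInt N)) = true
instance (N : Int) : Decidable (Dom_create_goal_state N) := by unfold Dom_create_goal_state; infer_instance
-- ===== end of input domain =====

-- B builds the flat sequence 1..N^2-1 followed by 0 once and reshapes it into rows by slicing
-- (objective: simpler — no per-cell conditional and no nested index arithmetic).

-- ===== PORT A =====
def create_goal_state (N : Int) : List (List Int) :=
  let goal : List (List Int) :=
    (PySem.List.pyRange 0 N 1).map (fun _ => PySem.List.pyRepeat [(0 : Int)] N)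
  (PySem.List.pyRange 0 N 1).foldl (fun goal i =>
    (PySem.List.pyRange 0 N 1).foldl (fun goal j =>
      goal.modify i.toNat (fun row =>
        row.set j.toNat (if i = N - 1 ∧ j = N - 1 then 0 else i * N + j + 1))) goal) goal

-- ===== PORT B =====
def create_goal_state_alt (N : Int) : List (List Int) :=
  if N ≤ 0 then []
  else
    let vals : List Int := PySem.List.pyRange 1 (N * N) 1 ++ [0]
    (PySem.List.pyRange 0 N 1).map (fun i =>
      PySem.List.slice vals (some (i * N)) (some ((i + 1) * N)))

-- ===== PRECONDITION & SPEC =====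
def Spec_create_goal_state (N : Int) (out : List (List Int)) : Prop := out = create_goal_state_alt N
instance (N : Int) (out : List (List Int)) : Decidable (Spec_create_goal_state N out) := by unfold Spec_create_goal_state; infer_instance

-- ===== CLAIM (what is proved, stated in full; the proofs are below) =====
def Claim_equal_create_goal_state : Prop := ∀ (N : Int), Dom_create_goal_state N → Spec_create_goal_state N (create_goal_state N)

-- ===== LEMMAS AND PROOFS =====

-- the cell value A writes at (i, j)
def cellVal (N i j : Int) : Int := if i = N - 1 ∧ j = N - 1 then 0 else i * N + j + 1

lemma set_take_succ {α : Type} (r : List α) (k : Nat) (v : α) (h : k < r.length) :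
    (r.set k v).take (k + 1) = r.take k ++ [v] := by
  rw [List.set_eq_take_cons_drop v h, List.take_append]
  simp [List.take_take, Nat.min_eq_left (Nat.le_of_lt h)]

lemma modify_take_succ {α : Type} (g : List α) (k : Nat) (f : α → α) (h : k < g.length) :
    (g.modify k f).take (k + 1) = g.take k ++ [f g[k]] := by
  rw [List.modify_eq_take_cons_drop h, List.take_append]
  simp [List.take_take, Nat.min_eq_left (Nat.le_of_lt h)]

lemma modify_drop_succ {α : Type} (g : List α) (k : Nat) (f : α → α) (h : k < g.length) :
    (g.modify k f).drop (k + 1) = g.drop (k + 1) := by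
  rw [List.modify_eq_take_cons_drop h, List.drop_append]
  simp [Nat.min_eq_left (Nat.le_of_lt h)]

lemma modify_id {α : Type} (g : List α) (k : Nat) : g.modify k (fun x => x) = g := by
  induction g generalizing k with
  | nil => simp
  | cons x xs ih =>
    cases k with
    | zero => simp
    | succ k => simpa using ih k

lemma modify_modify_same {α : Type} (g : List α) (k : Nat) (f₁ f₂ : α → α) :
    (g.modify k f₁).modify k f₂ = g.modify k (fun x => f₂ (f₁ x)) := by
  induction g generalizing k with
  | nil => simp
  | cons x xs ih =>
    cases k with
    | zero => simp
    | succ k => simpa using ih k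

-- a loop whose every step modifies the SAME index collapses to one modify of the row loop
lemma foldl_modify_same {α : Type} (l : List Int) (k : Nat) (φ : Int → α → α) :
    ∀ (g : List α), l.foldl (fun g j => g.modify k (φ j)) g
      = g.modify k (fun row => l.foldl (fun r j => φ j r) row) := by
  induction l with
  | nil => intro g; simp [modify_id]
  | cons j l ih =>
    intro g
    simp only [List.foldl_cons, ih, modify_modify_same]

-- the inner row loop: setting indices a..N-1 of a length-N row in order
lemma inner_loop (N : Int) (f : Int → Int) :
    ∀ (k : Nat) (a : Int) (r : List Int), a + k = N → 0 ≤ a → r.length = N.toNat →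
    (PySem.List.pyRange a N 1).foldl (fun r j => r.set j.toNat (f j)) r
      = r.take a.toNat ++ (PySem.List.pyRange a N 1).map f := by
  intro k
  induction k with
  | zero =>
    intro a r hk ha hlen
    rw [PySem.List.pyRange_one_eq_nil (by omega)]
    simp [List.take_of_length_le, hlen, show N.toNat ≤ a.toNat by omega]
  | succ k ih =>
    intro a r hk ha hlen
    have haN : a < N := by omega
    have hidx : a.toNat < r.length := by omega
    rw [PySem.List.pyRange_one_cons haN]
    simp only [List.foldl_cons, List.map_cons]
    rw [ih (a + 1) (r.set a.toNat (f a)) (by omega) (by omega) (by simpa using hlen)]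
    rw [show (a + 1).toNat = a.toNat + 1 by omega, set_take_succ r a.toNat (f a) hidx]
    simp

-- the outer grid loop: modifying indices a..N-1 of a length-N grid in order
lemma outer_loop (N : Int) (h : Int → List Int → List Int) :
    ∀ (k : Nat) (a : Int) (g : List (List Int)), a + k = N → 0 ≤ a → g.length = N.toNat →
    (PySem.List.pyRange a N 1).foldl (fun g i => g.modify i.toNat (h i)) g
      = g.take a.toNat ++ ((PySem.List.pyRange a N 1).zip (g.drop a.toNat)).map (fun p => h p.1 p.2) := by
  intro k
  induction k with
  | zero =>
    intro a g hk ha hlen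
    rw [PySem.List.pyRange_one_eq_nil (by omega)]
    simp [List.take_of_length_le, List.drop_of_length_le, show g.length ≤ a.toNat by omega]
  | succ k ih =>
    intro a g hk ha hlen
    have haN : a < N := by omega
    have hidx : a.toNat < g.length := by omega
    rw [PySem.List.pyRange_one_cons haN]
    simp only [List.foldl_cons]
    rw [ih (a + 1) (g.modify a.toNat (h a)) (by omega) (by omega) (by simpa using hlen)]
    rw [show (a + 1).toNat = a.toNat + 1 by omega,
        modify_take_succ g a.toNat (h a) hidx, modify_drop_succ g a.toNat (h a) hidx,
        List.drop_eq_getElem_cons hidx, List.zip_cons_cons, List.map_cons]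
    simp

-- A in closed row form
lemma A_closed (N : Int) (hN : 0 < N) :
    create_goal_state N
      = (PySem.List.pyRange 0 N 1).map (fun i => (PySem.List.pyRange 0 N 1).map (cellVal N i)) := by
  unfold create_goal_state
  simp only [PySem.List.pyRepeat_singleton]
  have hg0 : ((PySem.List.pyRange 0 N 1).map (fun _ => List.replicate N.toNat (0 : Int))).length = N.toNat := by
    simp [PySem.List.length_pyRange_one]
  simp only [foldl_modify_same]
  rw [outer_loop N _ N.toNat 0 _ (by omega) le_rfl hg0]
  simp only [Int.toNat_zero, List.take_zero, List.drop_zero, List.nil_append]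
  have hzip : (PySem.List.pyRange 0 N 1).zip ((PySem.List.pyRange 0 N 1).map (fun _ => List.replicate N.toNat (0 : Int)))
      = (PySem.List.pyRange 0 N 1).map (fun i => (i, List.replicate N.toNat (0 : Int))) := by
    have h : (List.map (fun x : Int => x) (PySem.List.pyRange 0 N 1)).zip
        (List.map (fun _ : Int => List.replicate N.toNat (0 : Int)) (PySem.List.pyRange 0 N 1))
        = List.map (fun a : Int => ((fun x : Int => x) a, (fun _ : Int => List.replicate N.toNat (0 : Int)) a)) (PySem.List.pyRange 0 N 1) := List.zip_map'
    simpa using h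
  rw [hzip, List.map_map]
  refine List.map_congr_left ?_
  intro i _
  simp only [Function.comp]
  rw [inner_loop N (fun j => if i = N - 1 ∧ j = N - 1 then (0 : Int) else i * N + j + 1) N.toNat 0 _ (by omega) le_rfl (by simp)]
  simp [cellVal]

-- the flat value list B builds
lemma vals_getElem (N : Int) (k : Nat) (hk : k < (N * N).toNat) :
    (PySem.List.pyRange 1 (N * N) 1 ++ [(0 : Int)])[k]'(by
        simp [PySem.List.length_pyRange_one]; omega)
      = if (k : Int) = N * N - 1 then 0 else (k : Int) + 1 := by
  have hlen : (PySem.List.pyRange 1 (N * N) 1).length = (N * N - 1).toNat := by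
    simp [PySem.List.length_pyRange_one]
  by_cases h : k < (N * N - 1).toNat
  · rw [List.getElem_append_left (by omega)]
    rw [PySem.List.getElem_pyRange_one]
    rw [if_neg (by omega)]
    omega
  · rw [List.getElem_append_right (by omega)]
    rw [if_pos (by omega)]
    simp

-- i*N + j = N*N - 1 exactly at the bottom-right cell
lemma corner_iff (N i j : Int) (hN : 0 < N) (hi0 : 0 ≤ i) (hiN : i < N) (hj0 : 0 ≤ j) (hjN : j < N) :
    i * N + j = N * N - 1 ↔ (i = N - 1 ∧ j = N - 1) := by
  constructor
  · intro h
    have hile : i ≤ N - 1 := by omega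
    rcases lt_or_eq_of_le hile with hlt | heq
    · exfalso; nlinarith
    · constructor
      · exact heq
      · nlinarith
  · rintro ⟨hi, hj⟩
    subst hi; subst hj; ring

-- each row B slices equals the row A writes
lemma B_row (N i : Int) (hN : 0 < N) (hi0 : 0 ≤ i) (hiN : i < N) :
    PySem.List.slice (PySem.List.pyRange 1 (N * N) 1 ++ [(0 : Int)]) (some (i * N)) (some ((i + 1) * N))
      = (PySem.List.pyRange 0 N 1).map (cellVal N i) := by
  have hNN : 1 ≤ N * N := by nlinarith
  have hvlen : (PySem.List.pyRange 1 (N * N) 1 ++ [(0 : Int)]).length = (N * N).toNat := by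
    simp [PySem.List.length_pyRange_one]
    omega
  have hiN0 : (0 : Int) ≤ i * N := mul_nonneg hi0 (le_of_lt hN)
  have hiN1 : (0 : Int) ≤ (i + 1) * N := mul_nonneg (by omega) (le_of_lt hN)
  have hub : (i + 1) * N ≤ N * N := by nlinarith
  have hrow : (i * N).toNat + N.toNat = ((i + 1) * N).toNat := by
    have : i * N + N = (i + 1) * N := by ring
    omega
  rw [PySem.List.slice_toNat _ hiN0 hiN1]
  apply List.ext_getElem
  · simp [PySem.List.length_pyRange_one, hvlen]
    omega
  · intro k h1 h2
    have hkN : k < N.toNat := by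
      simp [hvlen] at h1; omega
    have hkv : (i * N).toNat + k < (N * N).toNat := by omega
    rw [List.getElem_take, List.getElem_drop, vals_getElem N _ hkv]
    rw [List.getElem_map, PySem.List.getElem_pyRange_one]
    have hcast : ((i * N).toNat + k : Int) = i * N + k := by omega
    simp only [cellVal, zero_add]
    by_cases hc : i = N - 1 ∧ (k : Int) = N - 1
    · rw [if_pos hc, if_pos (by rw [Nat.cast_add, hcast]; exact (corner_iff N i k hN hi0 hiN (by omega) (by omega)).mpr hc)]
    · rw [if_neg hc, if_neg (by rw [Nat.cast_add, hcast]; intro h; exact hc ((corner_iff N i k hN hi0 hiN (by omega) (by omega)).mp h))]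
      rw [Nat.cast_add, hcast]

lemma main_eq (N : Int) : create_goal_state N = create_goal_state_alt N := by
  by_cases hN : 0 < N
  · rw [A_closed N hN]
    unfold create_goal_state_alt
    rw [if_neg (by omega)]
    refine (List.map_congr_left ?_).symm
    intro i hi
    rw [PySem.List.mem_pyRange_one] at hi
    exact B_row N i hN hi.1 hi.2
  · unfold create_goal_state create_goal_state_alt
    rw [if_pos (by omega), PySem.List.pyRange_one_eq_nil (by omega)]
    simp

-- ===== VERDICT (by name: the statement is the Claim_ definition above) =====
theorem create_goal_state_spec : Claim_equal_create_goal_state := by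
  intro N _
  unfold Spec_create_goal_state
  exact main_eq N
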